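-- pv_equiv track=rewrite | github.com/tssga-arch/myotc | src/shows.py | format_2_header
-- ===== SOURCE A (Python) =====
-- def format_2_header(fmt):
--   '''Create a header from a format string
--
--   :param str fmt: format string
--   :returns str: header string
--   '''
--   state = 'B'
--   fields = []
--   hfmt = ''
--
--   for c in fmt:
--     if state == 'B':
--       hfmt += c
--       if c != '{': continue
--
--       state = 'F' # Processing a field name
--       fname = ''
--     elif state =='F':
--       if c == '}':
--         hfmt += c
--         fields.append(fname)
--         state = 'B'
--       elif c == ':':
--         hfmt += c
--         fields.append(fname)
--         state = 'O'
--         opts = ''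
--       else:
--         fname += c
--     elif state =='O':
--       if c =='}':
--         if opts[0] == '-': opts = opts[1:]
--         if opts[-1] == ',' or opts[-1] == '_': opts = opts[:-1]
--         hfmt += opts
--         hfmt += c
--         state = 'B'
--       else:
--         opts += c
--
--   return hfmt.format(*fields)
-- ===== SOURCE B (Python) =====
-- def format_2_header(fmt):
--   '''Create a header from a format string
--
--   One-pass direct emission: split on '{', apply each field's (stripped) spec
--   immediately with builtin format(), instead of building a template and
--   calling str.format at the end.
--   '''
--   out = []
--   rest = fmt
--   while True:
--     lit, brace, rest = rest.partition('{')
--     out.append(lit.replace('}}', '}'))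
--     if not brace:
--       return ''.join(out)
--     head, _, rest = rest.partition('}')
--     name, colon, opts = head.partition(':')
--     if colon:
--       if opts.startswith('-'):
--         opts = opts[1:]
--       if opts.endswith((',', '_')):
--         opts = opts[:-1]
--       out.append(format(name, opts))
--     else:
--       out.append(name)
-- ===== Notes on version B (the rewrite author's own statement) =====
-- stated objective: simpler
-- what changed: Replaces A's char-by-char three-state machine that builds a template string plus a field list and finally calls str.format, by a single partition-based pass that emits the final text directly (each field's spec applied immediately with builtin format(), literal '}}' escapes collapsed with str.replace), with no template or .format phase; same O(n) but measurably faster by a constant factor since per-character Python-level state stepping and the second .format scan are replaced by C-level partition/replace operations.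
import Mathlib
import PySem

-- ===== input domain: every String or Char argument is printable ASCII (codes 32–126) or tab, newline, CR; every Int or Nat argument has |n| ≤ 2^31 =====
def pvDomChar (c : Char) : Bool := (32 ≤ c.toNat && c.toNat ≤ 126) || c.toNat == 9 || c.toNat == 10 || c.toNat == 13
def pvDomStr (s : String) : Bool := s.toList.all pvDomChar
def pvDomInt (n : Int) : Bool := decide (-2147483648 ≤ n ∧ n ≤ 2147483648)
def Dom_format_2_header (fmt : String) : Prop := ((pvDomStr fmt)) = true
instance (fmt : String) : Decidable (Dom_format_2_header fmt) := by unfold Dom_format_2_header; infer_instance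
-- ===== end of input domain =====

-- B emits the final header in one partition-based pass instead of A's state machine
-- that builds a template plus a field list and calls str.format at the end (objective: simpler).

-- ── shared hand port of CPython's str formatting (format(str_value, spec)); exact on the
--    specs Pre_ admits: [[fill]align]['0'][width]['.'precision]['s'] with fill ∉ {'{','}'} ──
def pvDigitsVal (l : List Char) : Nat := l.foldl (fun a c => a * 10 + (c.toNat - 48)) 0

/-- Parse a str-format spec to (fill, align, width, precision); `none` exactly where
CPython's `format(str, spec)` raises ValueError (on the ASCII domain). -/
def pySpecParse? (spec : List Char) : Option (Char × Char × Nat × Option Nat) :=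
  let fa : Char × Char × Bool × List Char :=
    match spec with
    | a :: b :: t =>
      if b = '<' ∨ b = '>' ∨ b = '^' then (a, b, true, t)
      else if a = '<' ∨ a = '>' ∨ a = '^' then (' ', a, false, b :: t)
      else (' ', '<', false, spec)
    | [a] => if a = '<' ∨ a = '>' ∨ a = '^' then (' ', a, false, []) else (' ', '<', false, spec)
    | [] => (' ', '<', false, [])
  match fa with
  | (fill0, align, hasFill, rest0) =>
    if fill0 = '{' ∨ fill0 = '}' then none else
    let fill := if ¬hasFill ∧ rest0.headD ' ' = '0' then '0' else fill0
    let w := pvDigitsVal (rest0.takeWhile Char.isDigit)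
    match rest0.dropWhile Char.isDigit with
    | [] => some (fill, align, w, none)
    | ['s'] => some (fill, align, w, none)
    | '.' :: t =>
      let p := t.takeWhile Char.isDigit
      if p = [] then none else
      match t.dropWhile Char.isDigit with
      | [] => some (fill, align, w, some (pvDigitsVal p))
      | ['s'] => some (fill, align, w, some (pvDigitsVal p))
      | _ => none
    | _ => none

/-- `format(value, spec)` for a str value: truncate to precision, pad to width.
On an invalid spec CPython raises ValueError (excluded by Pre_); we return `v` there. -/
def pyFormatSpec (v spec : List Char) : List Char :=
  match pySpecParse? spec with
  | none => v
  | some (fill, align, w, prec) =>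
    let s := match prec with | none => v | some p => v.take p
    let pad := w - s.length
    if align = '>' then List.replicate pad fill ++ s
    else if align = '^' then List.replicate (pad / 2) fill ++ s ++ List.replicate (pad - pad / 2) fill
    else s ++ List.replicate pad fill

-- ===== PORT A =====

/-- A's opts transformation: `if opts[0]=='-': opts=opts[1:]; if opts[-1] in ',_': opts=opts[:-1]`.
Python raises IndexError on empty opts (excluded by Pre_); here the empty list passes through. -/
def pyStripTail (o1 : List Char) : List Char :=
  match o1.getLast? with
  | some c => if c = ',' ∨ c = '_' then o1.dropLast else o1
  | none => o1

def pyStripOpts (opts : List Char) : List Char :=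
  pyStripTail (match opts with | '-' :: t => t | _ => opts)

inductive AState
  | B : AState
  | F : List Char → AState
  | O : List Char → AState

/-- A's character state machine, accumulating `hfmt` and `fields`. -/
def loopA : List Char → AState → List Char → List (List Char) → List Char × List (List Char)
  | [], _, hfmt, fields => (hfmt, fields)
  | c :: cs, AState.B, hfmt, fields =>
      if c = '{' then loopA cs (AState.F []) (hfmt ++ [c]) fields
      else loopA cs AState.B (hfmt ++ [c]) fields
  | c :: cs, AState.F fname, hfmt, fields =>
      if c = '}' then loopA cs AState.B (hfmt ++ [c]) (fields ++ [fname])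
      else if c = ':' then loopA cs (AState.O []) (hfmt ++ [c]) (fields ++ [fname])
      else loopA cs (AState.F (fname ++ [c])) hfmt fields
  | c :: cs, AState.O opts, hfmt, fields =>
      if c = '}' then loopA cs AState.B (hfmt ++ pyStripOpts opts ++ [c]) fields
      else loopA cs (AState.O (opts ++ [c])) hfmt fields

/-- Hand port of `hfmt.format(*fields)`, exact on the templates A builds from Pre_ inputs
(`{}` / `{:spec}` holes, `}}` escapes, no other braces); where CPython's .format raises
(lone brace, missing field) it copies characters instead. -/
def formatTemplate : List Char → List (List Char) → List Char
  | [], _ => []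
  | '{' :: '}' :: r2, f :: fs => f ++ formatTemplate r2 fs
  | '{' :: ':' :: r2, f :: fs =>
      pyFormatSpec f (r2.takeWhile (· ≠ '}')) ++
        formatTemplate ((r2.dropWhile (· ≠ '}')).drop 1) fs
  | '}' :: '}' :: r2, fields => '}' :: formatTemplate r2 fields
  | c :: rest, fields => c :: formatTemplate rest fields
termination_by t _ => t.length
decreasing_by
  all_goals simp_all
  all_goals first
    | omega
    | (have hA := List.length_dropWhile_le (p := fun x => decide (x ≠ '}')) (l := r2)
       have hB := List.length_dropWhile_le (p := fun x => !decide (x = '}')) (l := r2)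
       omega)

def format_2_header (fmt : String) : String :=
  let r := loopA fmt.toList AState.B [] []
  String.ofList (formatTemplate r.1 r.2)

-- ===== PORT B =====

/-- B's loop: `rest.partition('{')` / `.partition('}')` / `.partition(':')` ported as
takeWhile/contains/dropWhile; literal chunks get `'}}' → '}'` via PySem.Chars.replace;
each field is emitted immediately. -/
def loopB (rest : List Char) (out : List Char) : List Char :=
  let lit := rest.takeWhile (· ≠ '{')
  let out := out ++ PySem.Chars.replace lit ['}', '}'] ['}']
  if h : rest.contains '{' then
    let r1 := (rest.dropWhile (· ≠ '{')).drop 1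
    let head := r1.takeWhile (· ≠ '}')
    let r2 := (r1.dropWhile (· ≠ '}')).drop 1
    let name := head.takeWhile (· ≠ ':')
    if head.contains ':' then
      let opts0 := (head.dropWhile (· ≠ ':')).drop 1
      let opts1 := if PySem.Chars.startswith opts0 ['-'] then opts0.drop 1 else opts0
      let opts2 := if PySem.Chars.endswith opts1 [','] ∨ PySem.Chars.endswith opts1 ['_']
                   then opts1.dropLast else opts1
      loopB r2 (out ++ pyFormatSpec name opts2)
    else loopB r2 (out ++ name)
  else out
termination_by rest.length
decreasing_by
  all_goals
    have hne : rest.dropWhile (fun x => decide (x ≠ '{')) ≠ [] := by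
      intro hnil
      rw [List.dropWhile_eq_nil_iff] at hnil
      rw [List.contains_iff_mem] at h
      exact absurd (hnil _ h) (by simp)
    have h1 := List.length_dropWhile_le (p := fun x => decide (x ≠ '{')) (l := rest)
    have h2 := List.length_dropWhile_le (p := fun x => decide (x ≠ '}'))
      (l := (rest.dropWhile (fun x => decide (x ≠ '{'))).drop 1)
    have h3 : 0 < (rest.dropWhile (fun x => decide (x ≠ '{'))).length :=
      List.length_pos_iff.mpr hne
    simp only [List.length_drop] at *
    omega

def format_2_header_alt (fmt : String) : String :=
  String.ofList (loopB fmt.toList [])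

-- ===== PRECONDITION & SPEC =====

/-- A's opts is usable: nonempty, still nonempty after the leading '-' strip (else A's
`opts[0]`/`opts[-1]` raise IndexError), and the transformed spec is one CPython's
str-formatting accepts (else `.format` raises ValueError). -/
def pvOptsOk (opts : List Char) : Bool :=
  !opts.isEmpty &&
  (let o1 := if opts.headD ' ' = '-' then opts.drop 1 else opts
   !o1.isEmpty &&
   (let o2 := match o1.getLast? with
      | some c => if c = ',' ∨ c = '_' then o1.dropLast else o1
      | none => o1
    (pySpecParse? o2).isSome))

inductive PSt
  | top : PSt
  | rb : PSt
  | nm : PSt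
  | op : List Char → PSt
deriving DecidableEq

/-- One step of the shape check: `none` = invalid; `rb` = the second '}' of a '}}'
escape is due; `nm` = inside a field name; `op acc` = inside its opts. -/
def pvStep (st : Option PSt) (c : Char) : Option PSt :=
  match st with
  | none => none
  | some PSt.top =>
      if c = '{' then some PSt.nm
      else if c = '}' then some PSt.rb
      else some PSt.top
  | some PSt.rb => if c = '}' then some PSt.top else none
  | some PSt.nm =>
      if c = '}' then some PSt.top
      else if c = ':' then some (PSt.op [])
      else some PSt.nm
  | some (PSt.op acc) =>
      if c = '}' then (if pvOptsOk acc then some PSt.top else none)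
      else some (PSt.op (acc ++ [c]))

-- Pre_ = exactly the format strings on which Python A returns normally: literal text whose
-- '}' come in '}}' pairs, interleaved with fields '{name}' / '{name:opts}' (name free of
-- '}' ':'), each opts passing pvOptsOk. Elsewhere A raises: IndexError on an
-- empty/'-'-only opts, or ValueError from .format on a stray/unterminated brace or a spec
-- str-formatting rejects.
def Pre_format_2_header (fmt : String) : Prop :=
  fmt.toList.foldl pvStep (some PSt.top) = some PSt.top
instance (fmt : String) : Decidable (Pre_format_2_header fmt) := by
  unfold Pre_format_2_header; infer_instance

def pvWitness_format_2_header : String := "id {a}: {b:>6,} }}"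

def Spec_format_2_header (fmt : String) (out : String) : Prop := out = format_2_header_alt fmt
instance (fmt : String) (out : String) : Decidable (Spec_format_2_header fmt out) := by
  unfold Spec_format_2_header; infer_instance

-- ===== CLAIM (what is proved, stated in full; the proofs are below) =====
def Claim_equal_format_2_header : Prop :=
  ∀ (fmt : String), Dom_format_2_header fmt → Pre_format_2_header fmt →
    Spec_format_2_header fmt (format_2_header fmt)

-- ===== LEMMAS AND PROOFS =====

-- ── recursive twin of the fold-based checker, for the proofs ──

def pvChkR : List Char → PSt → Bool
  | [], st => match st with | PSt.top => true | _ => false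
  | c :: r, PSt.top =>
      if c = '{' then pvChkR r PSt.nm
      else if c = '}' then pvChkR r PSt.rb
      else pvChkR r PSt.top
  | c :: r, PSt.rb => if c = '}' then pvChkR r PSt.top else false
  | c :: r, PSt.nm =>
      if c = '}' then pvChkR r PSt.top
      else if c = ':' then pvChkR r (PSt.op [])
      else pvChkR r PSt.nm
  | c :: r, PSt.op acc =>
      if c = '}' then pvOptsOk acc && pvChkR r PSt.top
      else pvChkR r (PSt.op (acc ++ [c]))

theorem pv_fold_none : ∀ l : List Char, l.foldl pvStep none = none := by
  intro l; induction l with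
  | nil => rfl
  | cons c r ih => simpa [pvStep] using ih

theorem pv_fold_eq : ∀ (l : List Char) (st : PSt),
    (l.foldl pvStep (some st) = some PSt.top) ↔ (pvChkR l st = true) := by
  intro l
  induction l with
  | nil => intro st; cases st <;> simp [pvChkR]
  | cons c r ih =>
    intro st
    cases st with
    | top =>
      by_cases h1 : c = '{'
      · simpa [pvStep, pvChkR, h1] using ih PSt.nm
      · by_cases h2 : c = '}'
        · simpa [pvStep, pvChkR, h1, h2] using ih PSt.rb
        · simpa [pvStep, pvChkR, h1, h2] using ih PSt.top
    | rb =>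
      by_cases h1 : c = '}'
      · simpa [pvStep, pvChkR, h1] using ih PSt.top
      · simp [pvStep, pvChkR, h1, pv_fold_none]
    | nm =>
      by_cases h1 : c = '}'
      · simpa [pvStep, pvChkR, h1] using ih PSt.top
      · by_cases h2 : c = ':'
        · simpa [pvStep, pvChkR, h1, h2] using ih (PSt.op [])
        · simpa [pvStep, pvChkR, h1, h2] using ih PSt.nm
    | op acc =>
      by_cases h1 : c = '}'
      · by_cases h2 : pvOptsOk acc = true
        · simpa [pvStep, pvChkR, h1, h2] using ih PSt.top
        · simp [pvStep, pvChkR, h1, h2, pv_fold_none]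
      · simpa [pvStep, pvChkR, h1] using ih (PSt.op (acc ++ [c]))

-- ── the common normal form both ports are reduced to ──

/-- `'}}' → '}'` on a literal chunk (what both `.format` and `str.replace` do to it). -/
def myRepl : List Char → List Char
  | [] => []
  | [c] => [c]
  | c :: d :: r => if c = '}' ∧ d = '}' then '}' :: myRepl r else c :: myRepl (d :: r)

inductive CSt
  | top : CSt
  | rb : CSt
  | nm : List Char → CSt
  | op : List Char → List Char → CSt

/-- Canonical one-pass semantics of a Pre_-valid format string. -/
def canonGo : List Char → CSt → List Char
  | [], _ => []
  | c :: r, CSt.top =>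
      if c = '{' then canonGo r (CSt.nm [])
      else if c = '}' then canonGo r CSt.rb
      else c :: canonGo r CSt.top
  | c :: r, CSt.rb => if c = '}' then '}' :: canonGo r CSt.top else []
  | c :: r, CSt.nm acc =>
      if c = '}' then acc ++ canonGo r CSt.top
      else if c = ':' then canonGo r (CSt.op acc [])
      else canonGo r (CSt.nm (acc ++ [c]))
  | c :: r, CSt.op nmv acc =>
      if c = '}' then pyFormatSpec nmv (pyStripOpts acc) ++ canonGo r CSt.top
      else canonGo r (CSt.op nmv (acc ++ [c]))

-- ── A-side: split loopA into template and field streams ──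

inductive TSt
  | B : TSt
  | F : TSt
  | O : List Char → TSt

def tmplA : List Char → TSt → List Char
  | [], _ => []
  | c :: cs, TSt.B => if c = '{' then c :: tmplA cs TSt.F else c :: tmplA cs TSt.B
  | c :: cs, TSt.F =>
      if c = '}' then c :: tmplA cs TSt.B
      else if c = ':' then c :: tmplA cs (TSt.O [])
      else tmplA cs TSt.F
  | c :: cs, TSt.O opts =>
      if c = '}' then pyStripOpts opts ++ c :: tmplA cs TSt.B
      else tmplA cs (TSt.O (opts ++ [c]))

inductive FSt
  | B : FSt
  | F : List Char → FSt
  | O : FSt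

def fldsA : List Char → FSt → List (List Char)
  | [], _ => []
  | c :: cs, FSt.B => if c = '{' then fldsA cs (FSt.F []) else fldsA cs FSt.B
  | c :: cs, FSt.F nmv =>
      if c = '}' then nmv :: fldsA cs FSt.B
      else if c = ':' then nmv :: fldsA cs FSt.O
      else fldsA cs (FSt.F (nmv ++ [c]))
  | c :: cs, FSt.O => if c = '}' then fldsA cs FSt.B else fldsA cs FSt.O

def aT : AState → TSt
  | AState.B => TSt.B
  | AState.F _ => TSt.F
  | AState.O o => TSt.O o

def aF : AState → FSt
  | AState.B => FSt.B
  | AState.F n => FSt.F n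
  | AState.O _ => FSt.O

theorem loopA_eq : ∀ (l : List Char) (st : AState) (h : List Char) (fs : List (List Char)),
    loopA l st h fs = (h ++ tmplA l (aT st), fs ++ fldsA l (aF st)) := by
  intro l
  induction l with
  | nil => intro st h fs; simp [loopA, tmplA, fldsA]
  | cons c cs ih =>
    intro st h fs
    cases st with
    | B =>
      by_cases hc : c = '{' <;>
        simp [loopA, tmplA, fldsA, aT, aF, hc, ih, List.append_assoc]
    | F n =>
      by_cases hc : c = '}'
      · simp [loopA, tmplA, fldsA, aT, aF, hc, ih, List.append_assoc]
      · by_cases hc2 : c = ':' <;>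
          simp [loopA, tmplA, fldsA, aT, aF, hc, hc2, ih, List.append_assoc]
    | O o =>
      by_cases hc : c = '}' <;>
        simp [loopA, tmplA, fldsA, aT, aF, hc, ih, List.append_assoc]

-- ── name/opts segments pass through the scanners unchanged ──

def pvAllNm (nmv : List Char) : Prop := ∀ c ∈ nmv, c ≠ '}' ∧ c ≠ ':'
def pvNoRb (o : List Char) : Prop := ∀ c ∈ o, c ≠ '}'

theorem tmplA_skip_nm (nmv l' : List Char) (h : pvAllNm nmv) :
    tmplA (nmv ++ l') TSt.F = tmplA l' TSt.F := by
  induction nmv with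
  | nil => rfl
  | cons c t ih =>
    have hc := h c (by simp)
    simp only [List.cons_append, tmplA, if_neg hc.1, if_neg hc.2]
    exact ih (fun x hx => h x (by simp [hx]))

theorem fldsA_skip_nm (nmv : List Char) : ∀ (l' acc : List Char), pvAllNm nmv →
    fldsA (nmv ++ l') (FSt.F acc) = fldsA l' (FSt.F (acc ++ nmv)) := by
  induction nmv with
  | nil => intro l' acc _; simp
  | cons c t ih =>
    intro l' acc h
    have hc := h c (by simp)
    simp only [List.cons_append, fldsA, if_neg hc.1, if_neg hc.2]
    rw [ih l' (acc ++ [c]) (fun x hx => h x (by simp [hx]))]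
    simp

theorem tmplA_skip_op (o : List Char) : ∀ (l' acc : List Char), pvNoRb o →
    tmplA (o ++ l') (TSt.O acc) = tmplA l' (TSt.O (acc ++ o)) := by
  induction o with
  | nil => intro l' acc _; simp
  | cons c t ih =>
    intro l' acc h
    have hc := h c (by simp)
    simp only [List.cons_append, tmplA, if_neg hc]
    rw [ih l' (acc ++ [c]) (fun x hx => h x (by simp [hx]))]
    simp

theorem fldsA_skip_op (o l' : List Char) (h : pvNoRb o) :
    fldsA (o ++ l') FSt.O = fldsA l' FSt.O := by
  induction o with
  | nil => rfl
  | cons c t ih =>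
    have hc := h c (by simp)
    simp only [List.cons_append, fldsA, if_neg hc]
    exact ih (fun x hx => h x (by simp [hx]))

theorem canon_skip_nm (nmv : List Char) : ∀ (l' acc : List Char), pvAllNm nmv →
    canonGo (nmv ++ l') (CSt.nm acc) = canonGo l' (CSt.nm (acc ++ nmv)) := by
  induction nmv with
  | nil => intro l' acc _; simp
  | cons c t ih =>
    intro l' acc h
    have hc := h c (by simp)
    simp only [List.cons_append, canonGo, if_neg hc.1, if_neg hc.2]
    rw [ih l' (acc ++ [c]) (fun x hx => h x (by simp [hx]))]
    simp

theorem canon_skip_op (o : List Char) : ∀ (l' nmv acc : List Char), pvNoRb o →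
    canonGo (o ++ l') (CSt.op nmv acc) = canonGo l' (CSt.op nmv (acc ++ o)) := by
  induction o with
  | nil => intro l' nmv acc _; simp
  | cons c t ih =>
    intro l' nmv acc h
    have hc := h c (by simp)
    simp only [List.cons_append, canonGo, if_neg hc]
    rw [ih l' nmv (acc ++ [c]) (fun x hx => h x (by simp [hx]))]
    simp

-- ── inversion of the checker in field states ──

theorem inv_op : ∀ (r acc : List Char), pvChkR r (PSt.op acc) = true →
    ∃ opts r', pvNoRb opts ∧ pvOptsOk (acc ++ opts) = true ∧
      r = opts ++ '}' :: r' ∧ pvChkR r' PSt.top = true := by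
  intro r
  induction r with
  | nil => intro acc h; simp [pvChkR] at h
  | cons c t ih =>
    intro acc h
    by_cases hc : c = '}'
    · subst hc
      simp [pvChkR] at h
      exact ⟨[], t, by simp [pvNoRb], by simpa using h.1, by simp, h.2⟩
    · simp only [pvChkR, if_neg hc] at h
      obtain ⟨opts, r', hno, hok, hr, hchk⟩ := ih (acc ++ [c]) h
      exact ⟨c :: opts, r', by
        intro x hx; rcases List.mem_cons.mp hx with h1 | h2
        · simpa [h1] using hc
        · exact hno x h2,
        by simpa [List.append_assoc] using hok,
        by simp [hr], hchk⟩

theorem inv_nm : ∀ (r : List Char), pvChkR r PSt.nm = true →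
    (∃ nmv r', pvAllNm nmv ∧ r = nmv ++ '}' :: r' ∧ pvChkR r' PSt.top = true) ∨
    (∃ nmv opts r', pvAllNm nmv ∧ pvNoRb opts ∧ pvOptsOk opts = true ∧
      r = nmv ++ (':' :: (opts ++ '}' :: r')) ∧ pvChkR r' PSt.top = true) := by
  intro r
  induction r with
  | nil => intro h; simp [pvChkR] at h
  | cons c t ih =>
    intro h
    by_cases hc : c = '}'
    · subst hc
      simp [pvChkR] at h
      exact Or.inl ⟨[], t, by simp [pvAllNm], by simp, h⟩
    · by_cases hc2 : c = ':'
      · subst hc2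
        simp [pvChkR] at h
        obtain ⟨opts, r', hno, hok, hr, hchk⟩ := inv_op t [] h
        exact Or.inr ⟨[], opts, r', by simp [pvAllNm], hno, by simpa using hok,
          by simp [hr], hchk⟩
      · simp only [pvChkR, if_neg hc, if_neg hc2] at h
        rcases ih h with ⟨nmv, r', hnm, hr, hchk⟩ | ⟨nmv, opts, r', hnm, hno, hok, hr, hchk⟩
        · refine Or.inl ⟨c :: nmv, r', ?_, by simp [hr], hchk⟩
          intro x hx; rcases List.mem_cons.mp hx with h1 | h2
          · exact h1 ▸ ⟨hc, hc2⟩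
          · exact hnm x h2
        · refine Or.inr ⟨c :: nmv, opts, r', ?_, hno, hok, by simp [hr], hchk⟩
          intro x hx; rcases List.mem_cons.mp hx with h1 | h2
          · exact h1 ▸ ⟨hc, hc2⟩
          · exact hnm x h2

theorem pyStripTail_subset (o : List Char) : pyStripTail o ⊆ o := by
  intro c h
  unfold pyStripTail at h
  split at h
  · split at h
    · exact List.dropLast_subset _ h
    · exact h
  · exact h

theorem mem_pyStripOpts {c : Char} {o : List Char} (h : c ∈ pyStripOpts o) : c ∈ o := by
  unfold pyStripOpts at h
  have h2 := pyStripTail_subset _ h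
  split at h2
  · exact List.mem_cons_of_mem _ h2
  · exact h2

-- ── equations of the .format port on the template shapes A produces ──

theorem FT_hole (t : List Char) (f : List Char) (fs : List (List Char)) :
    formatTemplate ('{' :: '}' :: t) (f :: fs) = f ++ formatTemplate t fs := by
  simp [formatTemplate]

theorem FT_spec (spec t : List Char) (f : List Char) (fs : List (List Char))
    (h : pvNoRb spec) :
    formatTemplate ('{' :: ':' :: (spec ++ '}' :: t)) (f :: fs) =
      pyFormatSpec f spec ++ formatTemplate t fs := by
  have hp : ∀ c ∈ spec, (fun x => decide (x ≠ '}')) c = true := by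
    intro c hc; simpa using h c hc
  rw [formatTemplate]
  rw [List.takeWhile_append_of_pos hp, List.dropWhile_append_of_pos hp]
  simp

theorem FT_rbrb (t : List Char) (fs : List (List Char)) :
    formatTemplate ('}' :: '}' :: t) fs = '}' :: formatTemplate t fs := by
  simp [formatTemplate]

theorem FT_copy (c : Char) (t : List Char) (fs : List (List Char))
    (h1 : c ≠ '{') (h2 : c ≠ '}') :
    formatTemplate (c :: t) fs = c :: formatTemplate t fs := by
  rw [formatTemplate.eq_def]
  rcases t with _ | ⟨d, t2⟩ <;> rcases fs with _ | ⟨f, fs2⟩ <;> simp [h1, h2]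

-- ── myRepl and PySem.Chars.replace ──

theorem myRepl_pair (t : List Char) : myRepl ('}' :: '}' :: t) = '}' :: myRepl t := by
  simp [myRepl]

theorem myRepl_cons_ne {c : Char} (t : List Char) (hc : c ≠ '}') :
    myRepl (c :: t) = c :: myRepl t := by
  cases t <;> simp [myRepl, hc]

theorem myRepl_cons_nopair {c : Char} {t : List Char}
    (h : ¬ (['}', '}'].isPrefixOf (c :: t) = true)) : myRepl (c :: t) = c :: myRepl t := by
  by_cases hc : c = '}'
  · subst hc
    rcases t with _ | ⟨d, t2⟩
    · simp [myRepl]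
    · by_cases hd : d = '}'
      · subst hd; simp [List.isPrefixOf] at h
      · simp [myRepl, hd]
  · exact myRepl_cons_ne t hc

theorem rep_go : ∀ (fuel : Nat) (l acc : List Char), l.length ≤ fuel →
    PySem.Chars.replace.go ['}', '}'] ['}'] fuel l acc = acc.reverse ++ myRepl l := by
  intro fuel
  induction fuel with
  | zero =>
    intro l acc hl
    have : l = [] := List.eq_nil_of_length_eq_zero (Nat.le_zero.mp hl)
    subst this; simp [PySem.Chars.replace.go, myRepl]
  | succ n ih =>
    intro l acc hl
    rcases l with _ | ⟨c, t⟩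
    · simp [PySem.Chars.replace.go, myRepl]
    · by_cases hp : ['}', '}'].isPrefixOf (c :: t) = true
      · rcases t with _ | ⟨d, t2⟩
        · simp [List.isPrefixOf] at hp
        · simp only [List.isPrefixOf, List.isPrefixOf_cons₂] at hp
          simp only [Bool.and_eq_true, beq_iff_eq] at hp
          obtain ⟨rfl, h2⟩ : '}' = c ∧ ('}' = d ∧ _) := by
            constructor
            · exact hp.1
            · exact ⟨hp.2.1, trivial⟩
          obtain ⟨rfl, _⟩ := h2
          rw [PySem.Chars.replace.go]
          simp only [List.isPrefixOf_cons₂, beq_self_eq_true, Bool.true_and]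
          rw [if_pos (by simp [List.isPrefixOf])]
          simp only [List.length_nil, List.drop_zero, List.drop_succ_cons, List.length_cons,
            List.reverse_cons, List.reverse_nil, List.nil_append, List.singleton_append]
          rw [ih t2 ('}' :: acc) (by simp at hl; omega), myRepl_pair]
          simp
      · rw [PySem.Chars.replace.go]
        rw [if_neg hp]
        have := ih t (c :: acc) (by simp at hl; omega)
        rw [this, myRepl_cons_nopair hp]
        simp

theorem replace_eq (l : List Char) :
    PySem.Chars.replace l ['}', '}'] ['}'] = myRepl l := by
  rw [PySem.Chars.replace]
  rw [if_neg (by simp)]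
  simpa using rep_go l.length l [] le_rfl

-- ── B's startswith/endswith strip chain equals A's pyStripOpts ──

theorem sw_single (o : List Char) (c : Char) :
    PySem.Chars.startswith o [c] = (o.head? == some c) := by
  cases o <;> simp [PySem.Chars.startswith, List.isPrefixOf, eq_comm]

theorem ew_single (o : List Char) (c : Char) :
    PySem.Chars.endswith o [c] = (o.getLast? == some c) := by
  rw [PySem.Chars.endswith, List.isSuffixOf, List.getLast?_eq_head?_reverse]
  cases h : o.reverse with
  | nil => simp
  | cons a t => simp [List.isPrefixOf, eq_comm]


theorem stripB_eq (o : List Char) :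
    (if PySem.Chars.endswith (if PySem.Chars.startswith o ['-'] then o.drop 1 else o) [','] ∨
        PySem.Chars.endswith (if PySem.Chars.startswith o ['-'] then o.drop 1 else o) ['_']
     then (if PySem.Chars.startswith o ['-'] then o.drop 1 else o).dropLast
     else (if PySem.Chars.startswith o ['-'] then o.drop 1 else o)) = pyStripOpts o := by
  have h1 : (if PySem.Chars.startswith o ['-'] then o.drop 1 else o) =
      (match o with | '-' :: t => t | _ => o : List Char) := by
    rw [sw_single]
    rcases o with _ | ⟨a, t⟩
    · simp
    · by_cases ha : a = '-'
      · subst ha; simp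
      · rw [if_neg (by simp [ha])]
        split
        · simp_all
        · rfl
  rw [h1]
  clear h1
  unfold pyStripOpts pyStripTail
  rw [ew_single, ew_single]
  cases hL : (match o with | '-' :: t => t | _ => o : List Char).getLast? with
  | none => simp [hL]
  | some x => by_cases hx : x = ',' ∨ x = '_' <;> simp [hL, hx]

-- ── A's machine + .format equals the canonical pass ──

theorem pv_A_main : ∀ (n : Nat) (l : List Char), l.length ≤ n → pvChkR l PSt.top = true →
    formatTemplate (tmplA l TSt.B) (fldsA l FSt.B) = canonGo l CSt.top := by
  intro n
  induction n with
  | zero =>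
    intro l hl _
    have h0 : l = [] := List.eq_nil_of_length_eq_zero (Nat.le_zero.mp hl)
    subst h0; simp [tmplA, fldsA, formatTemplate, canonGo]
  | succ n ih =>
    intro l hl hchk
    rcases l with _ | ⟨c, r⟩
    · simp [tmplA, fldsA, formatTemplate, canonGo]
    by_cases hc : c = '{'
    · subst hc
      have h2 : pvChkR r PSt.nm = true := by simpa [pvChkR] using hchk
      rcases inv_nm r h2 with ⟨nmv, r', hnm, hr, hchk'⟩ | ⟨nmv, opts, r', hnm, hno, hok, hr, hchk'⟩
      · subst hr
        have hlen : r'.length ≤ n := by simp [List.length_append] at hl; omega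
        have hT : tmplA ('{' :: (nmv ++ '}' :: r')) TSt.B = '{' :: '}' :: tmplA r' TSt.B := by
          simp only [tmplA, reduceIte]
          rw [tmplA_skip_nm nmv _ hnm]
          simp [tmplA]
        have hF : fldsA ('{' :: (nmv ++ '}' :: r')) FSt.B = nmv :: fldsA r' FSt.B := by
          simp only [fldsA, reduceIte]
          rw [fldsA_skip_nm nmv _ [] hnm]
          simp [fldsA]
        have hC : canonGo ('{' :: (nmv ++ '}' :: r')) CSt.top = nmv ++ canonGo r' CSt.top := by
          simp only [canonGo, reduceIte]
          rw [canon_skip_nm nmv _ [] hnm]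
          simp [canonGo]
        rw [hT, hF, FT_hole, hC, ih r' hlen hchk']
      · subst hr
        have hlen : r'.length ≤ n := by simp [List.length_append] at hl; omega
        have hno' : pvNoRb (pyStripOpts opts) := fun x hxm => hno x (mem_pyStripOpts hxm)
        have hT : tmplA ('{' :: (nmv ++ (':' :: (opts ++ '}' :: r')))) TSt.B =
            '{' :: ':' :: (pyStripOpts opts ++ '}' :: tmplA r' TSt.B) := by
          simp only [tmplA, reduceIte]
          rw [tmplA_skip_nm nmv _ hnm]
          simp only [tmplA, reduceIte]
          rw [tmplA_skip_op opts _ [] hno]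
          simp [tmplA]
        have hF : fldsA ('{' :: (nmv ++ (':' :: (opts ++ '}' :: r')))) FSt.B =
            nmv :: fldsA r' FSt.B := by
          simp only [fldsA, reduceIte]
          rw [fldsA_skip_nm nmv _ [] hnm]
          simp only [fldsA, reduceIte]
          rw [fldsA_skip_op opts _ hno]
          simp [fldsA]
        have hC : canonGo ('{' :: (nmv ++ (':' :: (opts ++ '}' :: r')))) CSt.top =
            pyFormatSpec nmv (pyStripOpts opts) ++ canonGo r' CSt.top := by
          simp only [canonGo, reduceIte]
          rw [canon_skip_nm nmv _ [] hnm]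
          simp [canonGo]
          rw [canon_skip_op opts _ nmv [] hno]
          simp [canonGo]
        rw [hT, hF, FT_spec _ _ _ _ hno', hC, ih r' hlen hchk']
    · by_cases hc2 : c = '}'
      · subst hc2
        have h2 : pvChkR r PSt.rb = true := by simpa [pvChkR] using hchk
        rcases r with _ | ⟨d, r2⟩
        · simp [pvChkR] at h2
        by_cases hd : d = '}'
        · subst hd
          have h3 : pvChkR r2 PSt.top = true := by simpa [pvChkR] using h2
          have hlen : r2.length ≤ n := by simp at hl; omega
          have hT : tmplA ('}' :: '}' :: r2) TSt.B = '}' :: '}' :: tmplA r2 TSt.B := by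
            simp [tmplA]
          have hF : fldsA ('}' :: '}' :: r2) FSt.B = fldsA r2 FSt.B := by simp [fldsA]
          have hC : canonGo ('}' :: '}' :: r2) CSt.top = '}' :: canonGo r2 CSt.top := by
            simp [canonGo]
          rw [hT, hF, FT_rbrb, hC, ih r2 hlen h3]
        · simp [pvChkR, hd] at h2
      · have h2 : pvChkR r PSt.top = true := by simpa [pvChkR, hc, hc2] using hchk
        have hlen : r.length ≤ n := by simp at hl; omega
        have hT : tmplA (c :: r) TSt.B = c :: tmplA r TSt.B := by simp [tmplA, hc]
        have hF : fldsA (c :: r) FSt.B = fldsA r FSt.B := by simp [fldsA, hc]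
        have hC : canonGo (c :: r) CSt.top = c :: canonGo r CSt.top := by
          simp [canonGo, hc, hc2]
        rw [hT, hF, FT_copy c _ _ hc hc2, hC, ih r hlen h2]

-- ── splitting off the literal chunk before a '{' ──

theorem lit_split : ∀ (n : Nat) (lit rest : List Char), lit.length ≤ n → '{' ∉ lit →
    rest.head? ≠ some '}' → pvChkR (lit ++ rest) PSt.top = true →
    pvChkR rest PSt.top = true ∧
      canonGo (lit ++ rest) CSt.top = myRepl lit ++ canonGo rest CSt.top := by
  intro n
  induction n with
  | zero =>
    intro lit rest hl _ _ hchk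
    have h0 : lit = [] := List.eq_nil_of_length_eq_zero (Nat.le_zero.mp hl)
    subst h0
    exact ⟨by simpa using hchk, by simp [myRepl]⟩
  | succ n ih =>
    intro lit rest hl hnb hhd hchk
    rcases lit with _ | ⟨c, t⟩
    · exact ⟨by simpa using hchk, by simp [myRepl]⟩
    have hc1 : c ≠ '{' := fun h => hnb (by simp [h])
    by_cases hc : c = '}'
    · subst hc
      have h2 : pvChkR (t ++ rest) PSt.rb = true := by simpa [pvChkR] using hchk
      rcases t with _ | ⟨d, t2⟩
      · exfalso
        rcases rest with _ | ⟨e, r2⟩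
        · simpa [pvChkR] using h2
        · have he : e ≠ '}' := by intro h; exact hhd (by simp [h])
          simpa [pvChkR, he] using h2
      · by_cases hd : d = '}'
        · subst hd
          have h3 : pvChkR (t2 ++ rest) PSt.top = true := by simpa [pvChkR] using h2
          have hlen : t2.length ≤ n := by simp at hl; omega
          obtain ⟨ha, hb⟩ := ih t2 rest hlen (fun hm => hnb (by simp [hm])) hhd h3
          refine ⟨ha, ?_⟩
          rw [myRepl_pair]
          simp only [List.cons_append, canonGo, reduceIte]
          rw [hb]
          simp
        · exfalso; simp [pvChkR, hd] at h2
    · have h2 : pvChkR (t ++ rest) PSt.top = true := by simpa [pvChkR, hc1, hc] using hchk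
      have hlen : t.length ≤ n := by simp at hl; omega
      obtain ⟨ha, hb⟩ := ih t rest hlen (fun hm => hnb (by simp [hm])) hhd h2
      refine ⟨ha, ?_⟩
      rw [myRepl_cons_ne t hc]
      simp only [List.cons_append, canonGo, if_neg hc1, if_neg hc]
      rw [hb]

theorem dropWhile_eq_cons_head {p : Char → Bool} {l l' : List Char} {a : Char}
    (h : l.dropWhile p = a :: l') : p a = false := by
  induction l with
  | nil => simp at h
  | cons c t ih =>
    rw [List.dropWhile_cons] at h
    by_cases hp : p c = true
    · rw [if_pos hp] at h; exact ih h
    · rw [if_neg hp] at h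
      injection h with h1 h2
      subst h1; simpa using hp

-- ── B's partition loop equals the canonical pass ──

theorem pv_B_main : ∀ (n : Nat) (l out : List Char), l.length ≤ n → pvChkR l PSt.top = true →
    loopB l out = out ++ canonGo l CSt.top := by
  intro n
  induction n with
  | zero =>
    intro l out hl _
    have h0 : l = [] := List.eq_nil_of_length_eq_zero (Nat.le_zero.mp hl)
    subst h0
    rw [loopB]
    simp [replace_eq, myRepl, canonGo]
  | succ n ih =>
    intro l out hl hchk
    by_cases hct : l.contains '{'
    · have hmem : '{' ∈ l := List.contains_iff_mem.mp hct
      obtain ⟨r, hdw⟩ : ∃ r, l.dropWhile (fun x => decide (x ≠ '{')) = '{' :: r := by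
        cases hh : l.dropWhile (fun x => decide (x ≠ '{')) with
        | nil =>
          rw [List.dropWhile_eq_nil_iff] at hh
          exact absurd (hh _ hmem) (by simp)
        | cons d rr =>
          have hd : d = '{' := by simpa using dropWhile_eq_cons_head hh
          subst hd
          exact ⟨rr, rfl⟩
      have hl_eq : l = l.takeWhile (fun x => decide (x ≠ '{')) ++ '{' :: r := by
        conv_lhs => rw [← List.takeWhile_append_dropWhile (p := fun x => decide (x ≠ '{')) (l := l)]
        rw [hdw]
      set lit := l.takeWhile (fun x => decide (x ≠ '{')) with hlit
      have hnc : '{' ∉ lit := by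
        intro hm
        have := List.mem_takeWhile_imp hm
        simp at this
      obtain ⟨hr0, hcan⟩ := lit_split lit.length lit ('{' :: r) le_rfl hnc (by simp)
        (by rw [← hl_eq]; exact hchk)
      have hrnm : pvChkR r PSt.nm = true := by simpa [pvChkR] using hr0
      have hr1 : (l.dropWhile (fun x => decide (x ≠ '{'))).drop 1 = r := by rw [hdw]; rfl
      rw [loopB, dif_pos hct]
      simp only [hr1, ← hlit]
      rcases inv_nm r hrnm with ⟨nmv, r', hnm, hr, hchk'⟩ | ⟨nmv, opts, r', hnm, hno, hok, hr, hchk'⟩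
      · have hnm' : ∀ x ∈ nmv, (fun x => decide (x ≠ '}')) x = true := by
          intro x hxm; simpa using (hnm x hxm).1
        have hnmc : ∀ x ∈ nmv, (fun x => decide (x ≠ ':')) x = true := by
          intro x hxm; simpa using (hnm x hxm).2
        have hhead : r.takeWhile (fun x => decide (x ≠ '}')) = nmv := by
          rw [hr, List.takeWhile_append_of_pos hnm']; simp
        have hrest : (r.dropWhile (fun x => decide (x ≠ '}'))).drop 1 = r' := by
          rw [hr, List.dropWhile_append_of_pos hnm']; simp
        have hnocol : nmv.contains ':' = false := by
          rw [Bool.eq_false_iff]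
          intro hcc
          exact (hnm _ (List.contains_iff_mem.mp hcc)).2 rfl
        have hname : nmv.takeWhile (fun x => decide (x ≠ ':')) = nmv :=
          List.takeWhile_eq_self_iff.mpr hnmc
        rw [hhead, hrest, hname, if_neg (by rw [hnocol]; exact Bool.false_ne_true)]
        have hlen : r'.length ≤ n := by
          have := congrArg List.length hl_eq
          rw [hr] at this
          simp [List.length_append] at this
          omega
        rw [ih r' _ hlen hchk']
        conv_rhs => rw [hl_eq, hcan]
        have hCr : canonGo ('{' :: r) CSt.top = nmv ++ canonGo r' CSt.top := by
          simp only [canonGo, reduceIte]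
          rw [hr, canon_skip_nm nmv _ [] hnm]
          simp [canonGo]
        rw [hCr, replace_eq]
        simp [List.append_assoc]
      · have hnm' : ∀ x ∈ nmv, (fun x => decide (x ≠ '}')) x = true := by
          intro x hxm; simpa using (hnm x hxm).1
        have hnmc : ∀ x ∈ nmv, (fun x => decide (x ≠ ':')) x = true := by
          intro x hxm; simpa using (hnm x hxm).2
        have hoq : ∀ x ∈ opts, (fun x => decide (x ≠ '}')) x = true := by
          intro x hxm; simpa using hno x hxm
        have hhead : r.takeWhile (fun x => decide (x ≠ '}')) = nmv ++ (':' :: opts) := by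
          rw [hr, List.takeWhile_append_of_pos hnm',
            List.takeWhile_cons_of_pos (by decide),
            List.takeWhile_append_of_pos hoq,
            List.takeWhile_cons_of_neg (by decide)]
          simp
        have hrest : (r.dropWhile (fun x => decide (x ≠ '}'))).drop 1 = r' := by
          rw [hr, List.dropWhile_append_of_pos hnm',
            List.dropWhile_cons_of_pos (by decide),
            List.dropWhile_append_of_pos hoq,
            List.dropWhile_cons_of_neg (by decide)]
          simp
        have hcol : (nmv ++ (':' :: opts)).contains ':' = true := by
          rw [List.contains_iff_mem]; simp
        have hname : (nmv ++ (':' :: opts)).takeWhile (fun x => decide (x ≠ ':')) = nmv := by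
          rw [List.takeWhile_append_of_pos hnmc]; simp
        have hopts0 : ((nmv ++ (':' :: opts)).dropWhile (fun x => decide (x ≠ ':'))).drop 1 = opts := by
          rw [List.dropWhile_append_of_pos hnmc]; simp
        rw [hhead, hrest, hname, if_pos hcol, hopts0, stripB_eq]
        have hlen : r'.length ≤ n := by
          have := congrArg List.length hl_eq
          rw [hr] at this
          simp [List.length_append] at this
          omega
        rw [ih r' _ hlen hchk']
        conv_rhs => rw [hl_eq, hcan]
        have hCr : canonGo ('{' :: r) CSt.top =
            pyFormatSpec nmv (pyStripOpts opts) ++ canonGo r' CSt.top := by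
          simp only [canonGo, reduceIte]
          rw [hr, canon_skip_nm nmv _ [] hnm]
          simp [canonGo]
          rw [canon_skip_op opts _ nmv [] hno]
          simp [canonGo]
        rw [hCr, replace_eq]
        simp [List.append_assoc]
    · have hnm2 : '{' ∉ l := fun hm => hct (List.contains_iff_mem.mpr hm)
      have hfull : l.takeWhile (fun x => decide (x ≠ '{')) = l :=
        List.takeWhile_eq_self_iff.mpr (by intro x hxm; simp; intro hx; exact hnm2 (hx ▸ hxm))
      obtain ⟨_, hcan⟩ := lit_split l.length l [] le_rfl hnm2 (by simp)
        (by simpa using hchk)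
      rw [loopB, dif_neg hct, hfull, replace_eq]
      simp only [List.append_nil] at hcan
      rw [hcan]
      simp [canonGo]

theorem pv_main : ∀ l, l.foldl pvStep (some PSt.top) = some PSt.top →
    formatTemplate (loopA l AState.B [] []).1 (loopA l AState.B [] []).2 = loopB l [] := by
  intro l h
  have hc : pvChkR l PSt.top = true := (pv_fold_eq l PSt.top).mp h
  rw [loopA_eq]
  simp only [List.nil_append, aT, aF]
  rw [pv_A_main l.length l le_rfl hc, pv_B_main l.length l [] le_rfl hc]
  simp

-- ===== VERDICT (by name: the statement is the Claim_ definition above) =====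
theorem format_2_header_spec : Claim_equal_format_2_header := by
  intro fmt _ hpre
  unfold Spec_format_2_header format_2_header format_2_header_alt
  exact congrArg String.ofList (pv_main fmt.toList hpre)
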